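-- pv_equiv track=rewrite | github.com/achiit/digital-country-hackathon-etibet-2025 | bhutanhackathon/bhutan-legal-rag/version2.py | extract_general_info
-- ===== SOURCE A (Python) =====
-- def extract_general_info(context_docs, metadata, query):
--     """Extract general information"""
--     # Find the most relevant sentences
--     query_words = query.lower().split()
--     best_sentences = []
--
--     for doc in context_docs:
--         sentences = doc.split('.')
--         for sentence in sentences:
--             if len(sentence.strip()) > 20:
--                 score = sum(1 for word in query_words if word in sentence.lower())
--                 if score > 0:
--                     best_sentences.append((score, sentence.strip()))
--
--     if best_sentences:
--         best_sentences.sort(reverse=True, key=lambda x: x[0])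
--         top_sentences = [s for _, s in best_sentences[:2]]
--         return f"According to Bhutan's legal documents: {'. '.join(top_sentences)}."
--
--     return f"Based on the available legal text: {context_docs[0][:300]}..."
-- ===== SOURCE B (Python) =====
-- def extract_general_info(context_docs, metadata, query):
--     """Extract general information (single-pass top-2 selection, no sort)."""
--     query_words = query.lower().split()
--     best1 = None  # highest-scoring (score, stripped_sentence), earliest on ties
--     best2 = None  # second highest, earliest on ties
--     for doc in context_docs:
--         for sentence in doc.split('.'):
--             stripped = sentence.strip()
--             if len(stripped) > 20:
--                 low = sentence.lower()
--                 score = 0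
--                 for word in query_words:
--                     if word in low:
--                         score += 1
--                 if score > 0:
--                     if best1 is None or score > best1[0]:
--                         best1, best2 = (score, stripped), best1
--                     elif best2 is None or score > best2[0]:
--                         best2 = (score, stripped)
--     if best1 is not None:
--         top = best1[1] if best2 is None else best1[1] + '. ' + best2[1]
--         return f"According to Bhutan's legal documents: {top}."
--     return f"Based on the available legal text: {context_docs[0][:300]}..."
-- ===== Notes on version B (the rewrite author's own statement) =====
-- stated objective: alternative
-- what changed: B replaces A's collect-all-candidates-then-stable-reverse-sort-and-take-2 with a single-pass two-slot (best1/best2) selection using strict > updates, which preserves A's stable tie order.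
import Mathlib
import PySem

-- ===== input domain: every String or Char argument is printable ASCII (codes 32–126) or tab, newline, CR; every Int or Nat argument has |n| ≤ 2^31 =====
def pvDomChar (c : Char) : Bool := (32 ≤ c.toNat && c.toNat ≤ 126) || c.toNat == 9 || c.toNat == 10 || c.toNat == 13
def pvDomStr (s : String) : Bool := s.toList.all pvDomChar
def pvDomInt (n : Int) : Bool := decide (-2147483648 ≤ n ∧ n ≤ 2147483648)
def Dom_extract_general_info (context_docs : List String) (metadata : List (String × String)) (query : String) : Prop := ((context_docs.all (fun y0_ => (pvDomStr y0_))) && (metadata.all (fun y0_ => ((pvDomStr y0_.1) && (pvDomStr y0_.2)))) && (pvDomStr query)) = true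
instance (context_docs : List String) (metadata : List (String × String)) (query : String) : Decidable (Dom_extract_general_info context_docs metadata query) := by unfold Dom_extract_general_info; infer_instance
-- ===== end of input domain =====

-- B replaces A's collect-all-then-stable-sort with a single-pass two-slot (best1/best2) selection; equal score keeps the earlier sentence, matching A's stable reverse sort.

-- ===== PORT A =====
def extract_general_info (context_docs : List String) (metadata : List (String × String)) (query : String) : String :=
  let query_words := PySem.Str.split₀ (PySem.Str.lower query)
  let best_sentences : List (Int × String) :=
    context_docs.foldl (fun acc doc =>
      ((PySem.Str.split? doc ".").getD []).foldl (fun acc sentence =>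
        if PySem.Str.len (PySem.Str.strip sentence) > 20 then
          let score : Int := (query_words.map (fun word =>
            if PySem.Str.isIn word (PySem.Str.lower sentence) then (1 : Int) else 0)).sum
          if score > 0 then acc ++ [(score, PySem.Str.strip sentence)] else acc
        else acc) acc) []
  if best_sentences ≠ [] then
    let sortedL := PySem.List.sorted best_sentences (fun x => x.1) true
    let top_sentences := (sortedL.take 2).map (fun p => p.2)
    PySem.Str.join "" ["According to Bhutan's legal documents: ", PySem.Str.join ". " top_sentences, "."]
  else
    match context_docs with
    | [] => ""   -- Python raises IndexError here; excluded by Pre_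
    | d :: _ => PySem.Str.join "" ["Based on the available legal text: ", PySem.Str.slice d none (some 300), "..."]

-- ===== PORT B =====
def pvUpdateTop2 (st : Option (Int × String) × Option (Int × String)) (c : Int × String) :
    Option (Int × String) × Option (Int × String) :=
  match st.1 with
  | none => (some c, st.1)
  | some b1 =>
    if c.1 > b1.1 then (some c, some b1)
    else
      match st.2 with
      | none => (some b1, some c)
      | some b2 => if c.1 > b2.1 then (some b1, some c) else st

def extract_general_info_alt (context_docs : List String) (metadata : List (String × String)) (query : String) : String :=
  let query_words := PySem.Str.split₀ (PySem.Str.lower query)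
  let st : Option (Int × String) × Option (Int × String) :=
    context_docs.foldl (fun st doc =>
      ((PySem.Str.split? doc ".").getD []).foldl (fun st sentence =>
        let stripped := PySem.Str.strip sentence
        if PySem.Str.len stripped > 20 then
          let low := PySem.Str.lower sentence
          let score := query_words.foldl (fun acc word =>
            if PySem.Str.isIn word low then acc + 1 else acc) (0 : Int)
          if score > 0 then pvUpdateTop2 st (score, stripped) else st
        else st) st) (none, none)
  match st.1 with
  | some b1 =>
    let top := match st.2 with
      | none => b1.2
      | some b2 => PySem.Str.join "" [b1.2, ". ", b2.2]
    PySem.Str.join "" ["According to Bhutan's legal documents: ", top, "."]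
  | none =>
    match context_docs with
    | [] => ""
    | d :: _ => PySem.Str.join "" ["Based on the available legal text: ", PySem.Str.slice d none (some 300), "..."]

-- ===== PRECONDITION & SPEC =====
-- Pre_ excludes exactly context_docs = [], where Python A (and B) raise IndexError on context_docs[0].
def Pre_extract_general_info (context_docs : List String) (metadata : List (String × String)) (query : String) : Prop :=
  context_docs ≠ []
instance (context_docs : List String) (metadata : List (String × String)) (query : String) : Decidable (Pre_extract_general_info context_docs metadata query) := by unfold Pre_extract_general_info; infer_instance

def pvWitness_extract_general_info : List String × (List (String × String)) × String :=
  (["Bhutan has a rich legal tradition. ok"], [], "legal tradition")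

def Spec_extract_general_info (context_docs : List String) (metadata : List (String × String)) (query : String) (out : String) : Prop := out = extract_general_info_alt context_docs metadata query
instance (context_docs : List String) (metadata : List (String × String)) (query : String) (out : String) : Decidable (Spec_extract_general_info context_docs metadata query out) := by unfold Spec_extract_general_info; infer_instance

-- ===== CLAIM (what is proved, stated in full; the proofs are below) =====
def Claim_equal_extract_general_info : Prop := ∀ (context_docs : List String) (metadata : List (String × String)) (query : String), Dom_extract_general_info context_docs metadata query → Pre_extract_general_info context_docs metadata query → Spec_extract_general_info context_docs metadata query (extract_general_info context_docs metadata query)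


-- ===== LEMMAS AND PROOFS =====

-- the candidate test / value shared by both loops, with the score written as countP
def pvHit (qws : List String) (sentence : String) : Bool :=
  decide (PySem.Str.len (PySem.Str.strip sentence) > 20) &&
  decide ((qws.countP (fun w => PySem.Str.isIn w (PySem.Str.lower sentence)) : Int) > 0)

def pvVal (qws : List String) (sentence : String) : Int × String :=
  ((qws.countP (fun w => PySem.Str.isIn w (PySem.Str.lower sentence)) : Int), PySem.Str.strip sentence)

def pvCands (qws : List String) (docs : List String) : List (Int × String) :=
  docs.flatMap (fun d => ((((PySem.Str.split? d ".").getD []).filter (pvHit qws)).map (pvVal qws)))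

def pvFirstTwo {α : Type} (l : List α) : Option α × Option α := (l[0]?, l[1]?)

lemma pvHit_true {qws : List String} {s : String} (h1 : PySem.Str.len (PySem.Str.strip s) > 20)
    (h2 : ((qws.countP (fun w => PySem.Str.isIn w (PySem.Str.lower s)) : Int) > 0)) :
    pvHit qws s = true := by
  unfold pvHit; rw [decide_eq_true h1, decide_eq_true h2]; rfl

lemma pvHit_false1 {qws : List String} {s : String} (h1 : ¬ PySem.Str.len (PySem.Str.strip s) > 20) :
    pvHit qws s = false := by
  unfold pvHit; rw [decide_eq_false h1, Bool.false_and]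

lemma pvHit_false2 {qws : List String} {s : String}
    (h2 : ¬ ((qws.countP (fun w => PySem.Str.isIn w (PySem.Str.lower s)) : Int) > 0)) :
    pvHit qws s = false := by
  unfold pvHit; rw [decide_eq_false h2, Bool.and_false]

-- A's loop body, written with pvHit/pvVal
lemma pvBodyA (qws : List String) (acc : List (Int × String)) (s : String) :
      (if PySem.Str.len (PySem.Str.strip s) > 20 then
          let score : Int := (qws.map (fun word =>
            if PySem.Str.isIn word (PySem.Str.lower s) then (1 : Int) else 0)).sum
          if score > 0 then acc ++ [(score, PySem.Str.strip s)] else acc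
        else acc)
      = if pvHit qws s then acc ++ [pvVal qws s] else acc := by
  by_cases h1 : PySem.Str.len (PySem.Str.strip s) > 20
  · rw [if_pos h1]
    show (if ((qws.map (fun word =>
            if PySem.Str.isIn word (PySem.Str.lower s) then (1 : Int) else 0)).sum) > 0 then acc ++ [((qws.map (fun word =>
            if PySem.Str.isIn word (PySem.Str.lower s) then (1 : Int) else 0)).sum, PySem.Str.strip s)] else acc) = _
    rw [PySem.List.sum_map_ite_one_zero]
    by_cases h2 : ((qws.countP (fun w => PySem.Str.isIn w (PySem.Str.lower s)) : Int) > 0)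
    · rw [if_pos h2, if_pos (by rw [pvHit_true h1 h2] : pvHit qws s = true)]; rfl
    · rw [if_neg h2, if_neg (by rw [pvHit_false2 h2]; exact Bool.false_ne_true)]
  · rw [if_neg h1, if_neg (by rw [pvHit_false1 h1]; exact Bool.false_ne_true)]

-- B's loop body, written with pvHit/pvVal
lemma pvBodyB (qws : List String) (st : Option (Int × String) × Option (Int × String)) (s : String) :
      (let stripped := PySem.Str.strip s
        if PySem.Str.len stripped > 20 then
          let low := PySem.Str.lower s
          let score := qws.foldl (fun acc word =>
            if PySem.Str.isIn word low then acc + 1 else acc) (0 : Int)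
          if score > 0 then pvUpdateTop2 st (score, stripped) else st
        else st)
      = if pvHit qws s then pvUpdateTop2 st (pvVal qws s) else st := by
  by_cases h1 : PySem.Str.len (PySem.Str.strip s) > 20
  · show (if PySem.Str.len (PySem.Str.strip s) > 20 then
          if (qws.foldl (fun acc word =>
            if PySem.Str.isIn word (PySem.Str.lower s) then acc + 1 else acc) (0 : Int)) > 0 then
            pvUpdateTop2 st ((qws.foldl (fun acc word =>
              if PySem.Str.isIn word (PySem.Str.lower s) then acc + 1 else acc) (0 : Int)), PySem.Str.strip s)
          else st
        else st) = _
    rw [if_pos h1, PySem.List.foldl_count_if, zero_add]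
    by_cases h2 : ((qws.countP (fun w => PySem.Str.isIn w (PySem.Str.lower s)) : Int) > 0)
    · rw [if_pos h2, if_pos (by rw [pvHit_true h1 h2] : pvHit qws s = true)]; rfl
    · rw [if_neg h2, if_neg (by rw [pvHit_false2 h2]; exact Bool.false_ne_true)]
  · show (if PySem.Str.len (PySem.Str.strip s) > 20 then _ else st) = _
    rw [if_neg h1, if_neg (by rw [pvHit_false1 h1]; exact Bool.false_ne_true)]

lemma pvFoldl_filter_map {α β σ : Type} (p : α → Bool) (f : α → β) (g : σ → β → σ) (l : List α) (s : σ) :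
    ((l.filter p).map f).foldl g s = l.foldl (fun s x => if p x then g s (f x) else s) s := by
  induction l generalizing s with
  | nil => rfl
  | cons x t ih => by_cases h : p x <;> simp [h, ih]

-- A's collection loop builds exactly acc ++ pvCands
lemma pvA_collect (qws : List String) (docs : List String) (acc : List (Int × String)) :
    docs.foldl (fun acc doc =>
      ((PySem.Str.split? doc ".").getD []).foldl (fun acc sentence =>
        if PySem.Str.len (PySem.Str.strip sentence) > 20 then
          let score : Int := (qws.map (fun word =>
            if PySem.Str.isIn word (PySem.Str.lower sentence) then (1 : Int) else 0)).sum
          if score > 0 then acc ++ [(score, PySem.Str.strip sentence)] else acc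
        else acc) acc) acc = acc ++ pvCands qws docs := by
  have hinner : ∀ (acc : List (Int × String)) (d : String),
      ((PySem.Str.split? d ".").getD []).foldl (fun acc sentence =>
        if PySem.Str.len (PySem.Str.strip sentence) > 20 then
          let score : Int := (qws.map (fun word =>
            if PySem.Str.isIn word (PySem.Str.lower sentence) then (1 : Int) else 0)).sum
          if score > 0 then acc ++ [(score, PySem.Str.strip sentence)] else acc
        else acc) acc
      = acc ++ (((PySem.Str.split? d ".").getD []).filter (pvHit qws)).map (pvVal qws) := by
    intro acc d
    rw [List.foldl_ext _ (fun acc s => if pvHit qws s then acc ++ [pvVal qws s] else acc) acc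
      (fun acc s _ => pvBodyA qws acc s)]
    exact PySem.List.foldl_append_if (pvHit qws) (pvVal qws) _ acc
  induction docs generalizing acc with
  | nil => simp [pvCands]
  | cons d ds ih =>
    simp only [List.foldl_cons]
    rw [hinner, ih]
    simp [pvCands, List.append_assoc]

-- B's nested loop is a fold of pvUpdateTop2 over pvCands
lemma pvB_fold (qws : List String) (docs : List String) (st : Option (Int × String) × Option (Int × String)) :
    docs.foldl (fun st doc =>
      ((PySem.Str.split? doc ".").getD []).foldl (fun st sentence =>
        let stripped := PySem.Str.strip sentence
        if PySem.Str.len stripped > 20 then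
          let low := PySem.Str.lower sentence
          let score := qws.foldl (fun acc word =>
            if PySem.Str.isIn word low then acc + 1 else acc) (0 : Int)
          if score > 0 then pvUpdateTop2 st (score, stripped) else st
        else st) st) st = (pvCands qws docs).foldl pvUpdateTop2 st := by
  have hinner : ∀ (st : Option (Int × String) × Option (Int × String)) (d : String),
      ((PySem.Str.split? d ".").getD []).foldl (fun st sentence =>
        let stripped := PySem.Str.strip sentence
        if PySem.Str.len stripped > 20 then
          let low := PySem.Str.lower sentence
          let score := qws.foldl (fun acc word =>
            if PySem.Str.isIn word low then acc + 1 else acc) (0 : Int)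
          if score > 0 then pvUpdateTop2 st (score, stripped) else st
        else st) st
      = ((((PySem.Str.split? d ".").getD []).filter (pvHit qws)).map (pvVal qws)).foldl pvUpdateTop2 st := by
    intro st d
    rw [pvFoldl_filter_map]
    exact List.foldl_ext _ _ st fun st s _ => pvBodyB qws st s
  induction docs generalizing st with
  | nil => simp [pvCands]
  | cons d ds ih =>
    simp only [List.foldl_cons]
    rw [hinner, ih]
    simp [pvCands, List.foldl_append]

-- one insertion step of A's stable reverse insertion sort, seen through its first two slots
lemma pvInsert_step (x : Int × String) (l : List (Int × String)) :
    pvFirstTwo (PySem.List.insertBy (fun a b : Int × String => decide (b.1 < a.1)) x l)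
      = pvUpdateTop2 (pvFirstTwo l) x := by
  match l with
  | [] => simp [PySem.List.insertBy, pvFirstTwo, pvUpdateTop2]
  | [y] =>
    simp only [PySem.List.insertBy, pvFirstTwo, pvUpdateTop2]
    by_cases h : y.1 < x.1 <;> simp [h, not_lt.mp]
  | y :: z :: t =>
    simp only [PySem.List.insertBy, pvFirstTwo, pvUpdateTop2]
    by_cases h1 : y.1 < x.1 <;> by_cases h2 : z.1 < x.1 <;> simp [h1, h2]

lemma pvTop2_fold (L : List (Int × String)) (l : List (Int × String)) :
    pvFirstTwo (L.foldl (fun acc x => PySem.List.insertBy (fun a b : Int × String => decide (b.1 < a.1)) x acc) l)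
      = L.foldl pvUpdateTop2 (pvFirstTwo l) := by
  induction L generalizing l with
  | nil => rfl
  | cons x L ih => simp only [List.foldl_cons, ih, pvInsert_step]

lemma pvJoin_single (x : String) : PySem.Str.join ". " [x] = x := by
  simp [PySem.Str.join, PySem.Chars.join, List.intercalate]

lemma pvJoin_pair (x y : String) : PySem.Str.join ". " [x, y] = PySem.Str.join "" [x, ". ", y] := by
  simp [PySem.Str.join, PySem.Chars.join, List.intercalate]

-- ===== VERDICT (by name: the statement is the Claim_ definition above) =====
theorem extract_general_info_spec : Claim_equal_extract_general_info := by
  intro docs md q _ hpre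
  unfold Spec_extract_general_info extract_general_info extract_general_info_alt
  dsimp only []
  rw [pvA_collect, pvB_fold, List.nil_append]
  have hst : (pvCands (PySem.Str.split₀ (PySem.Str.lower q)) docs).foldl pvUpdateTop2 (none, none)
      = pvFirstTwo (PySem.List.sorted (pvCands (PySem.Str.split₀ (PySem.Str.lower q)) docs) (fun x => x.1) true) := by
    rw [PySem.List.sorted_rev_eq_foldl_insertBy]
    exact (pvTop2_fold _ []).symm
  rw [hst]
  set C := pvCands (PySem.Str.split₀ (PySem.Str.lower q)) docs with hC
  by_cases hne : C ≠ []
  · rw [if_pos hne]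
    have hSne : PySem.List.sorted C (fun x => x.1) true ≠ [] := by
      rw [Ne, PySem.List.sorted_eq_nil_iff]; exact hne
    match hS : PySem.List.sorted C (fun x => x.1) true, hSne with
    | a :: t, _ =>
      match t with
      | [] => simp [pvFirstTwo, pvJoin_single]
      | b :: t' => simp [pvFirstTwo, pvJoin_pair]
  · rw [if_neg hne]
    have hCnil : C = [] := not_not.mp hne
    rw [hCnil]
    match docs, hpre with
    | d :: ds, _ => rfl
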